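-- pv_equiv track=rewrite | github.com/usc-isi-i2/mowgli-in-the-jungle | mowgli/Lexicalization/RuleBasedLexic.py | _separate_edges
-- ===== SOURCE A (Python) =====
-- from collections import deque
-- from typing import List, Union, Iterable, Generator, Tuple
--
-- def _separate_edges(path: Iterable[str]) -> Generator[List[str], None, None]:
--     d = deque(maxlen=3)
--     iterable = iter(path)
--     for i, it in enumerate(iterable):
--         d.append(it)
--         if len(d) == 3:
--             yield list(d)
--             d.popleft()
--             d.popleft()
-- ===== SOURCE B (Python) =====
-- def _separate_edges(path):
--     # Materialize once, then zip three stride-2 slices: the k-th triple is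
--     # (seq[2k], seq[2k+1], seq[2k+2]), exactly the overlapping triples A emits.
--     seq = list(path)
--     for t in zip(seq[0::2], seq[1::2], seq[2::2]):
--         yield list(t)
-- ===== Notes on version B (the rewrite author's own statement) =====
-- stated objective: alternative
-- what changed: Replaces A's single-pass deque(maxlen=3) buffer with a slicing formulation: materialize the sequence and zip its three stride-2 slices seq[0::2], seq[1::2], seq[2::2], so each triple is read positionally instead of buffered.
import Mathlib
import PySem

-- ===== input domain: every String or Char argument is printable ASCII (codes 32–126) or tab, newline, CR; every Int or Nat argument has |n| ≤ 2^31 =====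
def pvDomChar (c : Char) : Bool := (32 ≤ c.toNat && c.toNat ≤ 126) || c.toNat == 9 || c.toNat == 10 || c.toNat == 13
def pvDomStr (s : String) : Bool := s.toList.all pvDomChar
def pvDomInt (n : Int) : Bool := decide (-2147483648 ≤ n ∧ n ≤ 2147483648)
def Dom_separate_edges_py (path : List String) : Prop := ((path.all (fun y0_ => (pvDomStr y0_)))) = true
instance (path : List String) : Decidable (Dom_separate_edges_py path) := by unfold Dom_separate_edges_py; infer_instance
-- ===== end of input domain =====

-- B replaces A's one-pass deque(maxlen=3) buffer with zipping the three stride-2 slices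
-- seq[0::2]/seq[1::2]/seq[2::2]; same values (A is a generator, B materializes the input
-- once — identical on the finite lists claimed here). Alternative decomposition, same cost.

-- ===== PORT A =====
-- one step of A's loop body: d.append(it) on a deque(maxlen=3), then if len(d)==3
-- yield list(d); d.popleft(); d.popleft()
def pvAStep (st : List String × List (List String)) (it : String) :
    List String × List (List String) :=
  let d0 := st.1 ++ [it]
  let d := if 3 < d0.length then d0.drop (d0.length - 3) else d0
  if d.length = 3 then (d.drop 2, st.2 ++ [d]) else (d, st.2)

def separate_edges_py (path : List String) : List (List String) :=
  (path.foldl pvAStep ([], [])).2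

-- ===== PORT B =====
-- xs[::2] on a list: exact port of the Python extended slice with step 2
-- (take the head, skip one, recurse)
def pvStride2 {α : Type} : List α → List α
  | [] => []
  | [x] => [x]
  | x :: _ :: xs => x :: pvStride2 xs

-- zip(s0, s1, s2) consumed by the for-loop, each triple yielded as a list
def pvZip3 (s0 s1 s2 : List String) : List (List String) :=
  ((s0.zip (s1.zip s2)).map fun t => [t.1, t.2.1, t.2.2])

def separate_edges_py_alt (path : List String) : List (List String) :=
  pvZip3 (pvStride2 path) (pvStride2 (path.drop 1)) (pvStride2 (path.drop 2))

-- ===== PRECONDITION & SPEC =====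
def Spec_separate_edges_py (path : List String) (out : List (List String)) : Prop := out = separate_edges_py_alt path
instance (path : List String) (out : List (List String)) : Decidable (Spec_separate_edges_py path out) := by unfold Spec_separate_edges_py; infer_instance

-- ===== CLAIM (what is proved, stated in full; the proofs are below) =====
def Claim_equal_separate_edges_py : Prop := ∀ (path : List String), Dom_separate_edges_py path → Spec_separate_edges_py path (separate_edges_py path)

-- ===== LEMMAS AND PROOFS =====
-- one-step unfolding of the stride-2 slice
theorem pvStride2_cons {α : Type} (x : α) (xs : List α) :
    pvStride2 (x :: xs) = x :: pvStride2 (xs.drop 1) := by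
  cases xs <;> simp [pvStride2]

-- B unfolds two elements at a time: on prev::b::c::r the zip of the three strided
-- slices emits [prev,b,c] and continues exactly as B applied to c::r
theorem pvAltStep (prev b c : String) (r : List String) :
    separate_edges_py_alt (prev :: b :: c :: r)
      = [prev, b, c] :: separate_edges_py_alt (c :: r) := by
  simp [separate_edges_py_alt, pvStride2_cons, pvZip3]

-- loop invariant for A: after a triple is emitted (or at the start after one element),
-- A's deque holds exactly the single anchor element prev
theorem pvFoldInv : ∀ (r : List String) (prev : String) (acc : List (List String)),
    (r.foldl pvAStep ([prev], acc)).2 = acc ++ separate_edges_py_alt (prev :: r)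
  | [], _, acc => by simp [separate_edges_py_alt, pvStride2, pvZip3]
  | [b], prev, acc => by
      simp [List.foldl, pvAStep, separate_edges_py_alt, pvZip3, pvStride2]
  | b :: c :: r, prev, acc => by
      show ((r.foldl pvAStep (pvAStep (pvAStep ([prev], acc) b) c))).2 = _
      have h1 : pvAStep ([prev], acc) b = ([prev, b], acc) := by simp [pvAStep]
      have h2 : pvAStep ([prev, b], acc) c = ([c], acc ++ [[prev, b, c]]) := by
        simp [pvAStep]
      rw [h1, h2, pvFoldInv r c (acc ++ [[prev, b, c]]), pvAltStep]
      simp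

-- ===== VERDICT (by name: the statement is the Claim_ definition above) =====
theorem separate_edges_py_spec : Claim_equal_separate_edges_py := by
  intro path _
  unfold Spec_separate_edges_py separate_edges_py
  cases path with
  | nil => simp [separate_edges_py_alt, pvStride2, pvZip3]
  | cons a r =>
    show ((r.foldl pvAStep (pvAStep ([], []) a))).2 = _
    have h : pvAStep ([], []) a = ([a], []) := by simp [pvAStep]
    rw [h, pvFoldInv r a []]
    simp
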